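-- pv_equiv track=rewrite | github.com/phamsonit/research_discipline_prediction | ultil.py | convert_to_predicted_disciplines
-- ===== SOURCE A (Python) =====
-- def convert_to_predicted_disciplines(predicted_topic_nums, map_top_dis):
--     """
--     convert discipline ids to corresponding discipline codes
--     :param predicted_topic_nums: list of int
--     :param map_top_dis: dictionary with key is topic id, value is discipline code
--     :return:
--     """
--     # TODO change map_top_dis to map_dis_top
--     predicted_disciplines = set()
--     for t in predicted_topic_nums:
--         # find this topic number in map_dis_top
--         # for each item in the map
--         for item in map_top_dis.items():
--             # get the list of topic ids
--             map_top_nums = item[1]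
--             # if predicted topic t is in the list of topic ids
--             if t in map_top_nums:
--                 # add discipline code to the predicted disciplines
--                 predicted_disciplines.add(item[0])
--     return predicted_disciplines
-- ===== SOURCE B (Python) =====
-- def convert_to_predicted_disciplines(predicted_topic_nums, map_top_dis):
--     """
--     convert discipline ids to corresponding discipline codes
--     :param predicted_topic_nums: list of int
--     :param map_top_dis: dictionary with key is discipline code, value is list of topic ids
--     :return:
--     """
--     # invert the map once: topic id -> discipline codes (in map order)
--     index = {}
--     for code, nums in map_top_dis.items():
--         for t in nums:
--             index.setdefault(t, []).append(code)
--     predicted_disciplines = set()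
--     for t in predicted_topic_nums:
--         for code in index.get(t, []):
--             predicted_disciplines.add(code)
--     return predicted_disciplines
-- ===== Notes on version B (the rewrite author's own statement) =====
-- stated objective: faster
-- what changed: Instead of rescanning every map entry's topic-id list for each predicted topic, B inverts the map once into a topic-id -> discipline-codes index and then adds the codes found by a single dictionary lookup per topic.
import Mathlib
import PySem

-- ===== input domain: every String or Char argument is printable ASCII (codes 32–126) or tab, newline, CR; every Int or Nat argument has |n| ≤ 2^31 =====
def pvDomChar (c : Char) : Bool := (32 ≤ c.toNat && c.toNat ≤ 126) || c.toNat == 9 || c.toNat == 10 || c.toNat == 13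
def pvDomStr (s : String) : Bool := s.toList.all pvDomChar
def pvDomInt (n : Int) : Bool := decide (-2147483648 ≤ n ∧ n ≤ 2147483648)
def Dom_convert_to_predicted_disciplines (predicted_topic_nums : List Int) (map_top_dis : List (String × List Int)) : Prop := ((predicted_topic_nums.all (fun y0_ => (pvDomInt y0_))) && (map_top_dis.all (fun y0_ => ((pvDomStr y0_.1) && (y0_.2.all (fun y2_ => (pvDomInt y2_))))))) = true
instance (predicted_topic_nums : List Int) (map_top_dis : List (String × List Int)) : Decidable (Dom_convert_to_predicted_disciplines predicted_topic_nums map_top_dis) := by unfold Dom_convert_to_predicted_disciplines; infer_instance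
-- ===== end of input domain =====

-- B inverts the map once into a topic-id -> discipline-codes index, replacing A's full map scan per topic (asymptotically faster); result proved identical.


-- ===== PORT A =====
-- for t in predicted_topic_nums: for item in map_top_dis.items(): if t in item[1]: predicted_disciplines.add(item[0])
def convert_to_predicted_disciplines (predicted_topic_nums : List Int) (map_top_dis : List (String × List Int)) : List String :=
  predicted_topic_nums.foldl
    (fun predicted_disciplines t =>
      map_top_dis.foldl
        (fun predicted_disciplines item =>
          if t ∈ item.2 then PySem.Set.add predicted_disciplines item.1 else predicted_disciplines)
        predicted_disciplines)
    PySem.Set.empty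

-- ===== PORT B =====
-- index.setdefault(t, []).append(code)  =  modify t [] (· ++ [code]); then one lookup per predicted topic
def convert_to_predicted_disciplines_alt (predicted_topic_nums : List Int) (map_top_dis : List (String × List Int)) : List String :=
  let index : PySem.Dict Int (List String) :=
    map_top_dis.foldl
      (fun index p => p.2.foldl (fun index t => index.modify t [] (· ++ [p.1])) index)
      PySem.Dict.empty
  predicted_topic_nums.foldl
    (fun predicted_disciplines t =>
      (index.getD t []).foldl (fun predicted_disciplines code => PySem.Set.add predicted_disciplines code)
        predicted_disciplines)
    PySem.Set.empty

-- ===== PRECONDITION & SPEC =====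
def Spec_convert_to_predicted_disciplines (predicted_topic_nums : List Int) (map_top_dis : List (String × List Int)) (out : List String) : Prop := out = convert_to_predicted_disciplines_alt predicted_topic_nums map_top_dis
instance (predicted_topic_nums : List Int) (map_top_dis : List (String × List Int)) (out : List String) : Decidable (Spec_convert_to_predicted_disciplines predicted_topic_nums map_top_dis out) := by unfold Spec_convert_to_predicted_disciplines; infer_instance

-- ===== CLAIM (what is proved, stated in full; the proofs are below) =====
def Claim_equal_convert_to_predicted_disciplines : Prop := ∀ (predicted_topic_nums : List Int) (map_top_dis : List (String × List Int)), Dom_convert_to_predicted_disciplines predicted_topic_nums map_top_dis → Spec_convert_to_predicted_disciplines predicted_topic_nums map_top_dis (convert_to_predicted_disciplines predicted_topic_nums map_top_dis)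

-- ===== LEMMAS AND PROOFS =====

-- the codes that B's index stores for topic t, entry by entry (with multiplicity)
def pvCollect (t : Int) : List (String × List Int) → List String
  | [] => []
  | p :: rest => List.replicate (p.2.count t) p.1 ++ pvCollect t rest

-- inner build loop: appending code for every occurrence of a topic in nums
theorem pvInner_getD (nums : List Int) (c : String) (d : PySem.Dict Int (List String)) (t : Int) :
    (nums.foldl (fun d t' => d.modify t' [] (· ++ [c])) d).getD t []
      = d.getD t [] ++ List.replicate (nums.count t) c := by
  induction nums generalizing d with
  | nil => simp
  | cons x xs ih =>
    simp only [List.foldl_cons, ih, PySem.Dict.getD_modify]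
    by_cases h : t = x
    · subst h
      simp [List.count_cons_self, List.replicate_succ]
    · simp [h, Ne.symm h]

-- whole build loop: index value at t is pvCollect t m
theorem pvBuild_getD (m : List (String × List Int)) (d : PySem.Dict Int (List String)) (t : Int) :
    (m.foldl (fun d p => p.2.foldl (fun d t' => d.modify t' [] (· ++ [p.1])) d) d).getD t []
      = d.getD t [] ++ pvCollect t m := by
  induction m generalizing d with
  | nil => simp [pvCollect]
  | cons p rest ih =>
    simp only [List.foldl_cons, ih, pvInner_getD, pvCollect, List.append_assoc]

theorem pvFold_replicate (n : ℕ) (c : String) (s : PySem.Set String) :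
    (List.replicate n c).foldl PySem.Set.add s
      = if n = 0 then s else PySem.Set.add s c := by
  induction n generalizing s with
  | zero => simp
  | succ k ih =>
    simp only [List.replicate_succ, List.foldl_cons, ih]
    by_cases hk : k = 0
    · simp [hk]
    · simp [hk]

-- adding pvCollect t m element by element equals A's scan of the map for t
theorem pvCollect_fold (t : Int) (m : List (String × List Int)) (s : PySem.Set String) :
    (pvCollect t m).foldl PySem.Set.add s
      = m.foldl (fun s p => if t ∈ p.2 then PySem.Set.add s p.1 else s) s := by
  induction m generalizing s with
  | nil => simp [pvCollect]
  | cons p rest ih =>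
    simp only [pvCollect, List.foldl_append, List.foldl_cons, pvFold_replicate, ih]
    by_cases h : t ∈ p.2
    · simp [h, List.count_eq_zero]
    · simp [h, List.count_eq_zero.mpr h]

-- ===== VERDICT (by name: the statement is the Claim_ definition above) =====
theorem convert_to_predicted_disciplines_spec : Claim_equal_convert_to_predicted_disciplines := by
  intro ts m _
  unfold Spec_convert_to_predicted_disciplines
  unfold convert_to_predicted_disciplines convert_to_predicted_disciplines_alt
  have hf : (fun (s : PySem.Set String) (t : Int) =>
        m.foldl (fun s p => if t ∈ p.2 then PySem.Set.add s p.1 else s) s)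
      = (fun (s : PySem.Set String) (t : Int) =>
        (((m.foldl (fun d p => p.2.foldl (fun d t' => d.modify t' [] (· ++ [p.1])) d)
            PySem.Dict.empty).getD t [])).foldl
          (fun s code => PySem.Set.add s code) s) := by
    funext s t
    rw [pvBuild_getD, PySem.Dict.getD_empty, List.nil_append, pvCollect_fold]
  rw [hf]
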